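-- pv_equiv track=rewrite | github.com/JXZGitHub/LC | assessment.py | lengthEachScene
-- ===== SOURCE A (Python) =====
-- def lengthEachScene(inputList):
--     # WRITE YOUR CODE HERE
--     charsSeen = set()
--     start = 0
--     allSequenceLengths = []
--     for end, c in enumerate(inputList):
--         seq1 = inputList[start:end + 1]
--         seq2 = inputList[end + 1:]
--         if not hasRepeatingScene(seq1, seq2):
--             allSequenceLengths.append(end - start + 1)
--             start = end + 1
--     return allSequenceLengths
--
-- def hasRepeatingScene(seq1, seq2):
--     return set(seq1).intersection(seq2)  # intersection means at least one repeat
-- ===== SOURCE B (Python) =====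
-- def lengthEachScene(inputList):
--     last = {}
--     for i, c in enumerate(inputList):
--         last[c] = i
--     allSequenceLengths = []
--     start = 0
--     segEnd = 0
--     for i, c in enumerate(inputList):
--         e = last[c]
--         if e > segEnd:
--             segEnd = e
--         if segEnd == i:
--             allSequenceLengths.append(i - start + 1)
--             start = i + 1
--     return allSequenceLengths
-- ===== Notes on version B (the rewrite author's own statement) =====
-- stated objective: faster
-- what changed: replaces A's per-index set-intersection of the current-segment slice with the remaining-suffix slice (a fresh set build per element, O(n^2)) by one precomputed last-occurrence dictionary and a single pass tracking the running maximum last-occurrence index of the current segment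
import Mathlib
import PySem

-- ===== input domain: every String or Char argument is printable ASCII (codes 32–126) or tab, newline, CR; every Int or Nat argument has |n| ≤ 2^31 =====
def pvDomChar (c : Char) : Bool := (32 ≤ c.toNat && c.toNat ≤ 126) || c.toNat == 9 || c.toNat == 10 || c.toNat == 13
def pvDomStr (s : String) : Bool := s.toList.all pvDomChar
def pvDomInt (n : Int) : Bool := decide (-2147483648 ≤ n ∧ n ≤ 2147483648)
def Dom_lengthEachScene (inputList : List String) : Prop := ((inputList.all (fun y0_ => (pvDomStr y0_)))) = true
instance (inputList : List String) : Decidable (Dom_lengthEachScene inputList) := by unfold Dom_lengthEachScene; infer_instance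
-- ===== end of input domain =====

-- B replaces A's per-index set-intersection of slices by a precomputed last-occurrence
-- dictionary and one pass tracking the segment's maximum last-occurrence index (objective: faster).

-- ===== PORT A =====
-- set(seq1).intersection(seq2); A only uses its truthiness (nonempty = at least one repeat)
def hasRepeatingScene (seq1 seq2 : List String) : PySem.Set String :=
  PySem.Set.inter (PySem.Set.ofList seq1) seq2

def lengthEachScene (inputList : List String) : List Int :=
  -- charsSeen = set() in A is dead code (never used); omitted
  let r := (PySem.List.enumerate inputList).foldl
    (fun (st : Int × List Int) p =>
      let seq1 := PySem.List.slice inputList (some st.1) (some (p.1 + 1))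
      let seq2 := PySem.List.slice inputList (some (p.1 + 1)) none
      if (hasRepeatingScene seq1 seq2).isEmpty then
        (p.1 + 1, st.2 ++ [p.1 - st.1 + 1])
      else st)
    ((0 : Int), ([] : List Int))
  r.2

-- ===== PORT B =====
def lengthEachScene_alt (inputList : List String) : List Int :=
  -- last[c] = i for i, c in enumerate(inputList)
  let last : PySem.Dict String Int :=
    (PySem.List.enumerate inputList).foldl (fun d p => d.insert p.2 p.1) PySem.Dict.empty
  -- one pass: (start, segEnd, result); the key p.2 is always present in last (getD default unreachable)
  let r := (PySem.List.enumerate inputList).foldl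
    (fun (st : Int × Int × List Int) p =>
      let e := last.getD p.2 0
      let segEnd := if e > st.2.1 then e else st.2.1
      if segEnd == p.1 then
        (p.1 + 1, segEnd, st.2.2 ++ [p.1 - st.1 + 1])
      else (st.1, segEnd, st.2.2))
    ((0 : Int), (0 : Int), ([] : List Int))
  r.2.2

-- ===== PRECONDITION & SPEC =====
def Spec_lengthEachScene (inputList : List String) (out : List Int) : Prop := out = lengthEachScene_alt inputList
instance (inputList : List String) (out : List Int) : Decidable (Spec_lengthEachScene inputList out) := by unfold Spec_lengthEachScene; infer_instance

-- ===== CLAIM (what is proved, stated in full; the proofs are below) =====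
def Claim_equal_lengthEachScene : Prop := ∀ (inputList : List String), Dom_lengthEachScene inputList → Spec_lengthEachScene inputList (lengthEachScene inputList)

-- ===== LEMMAS AND PROOFS =====

-- index of the LAST occurrence of c in xs (meaningful when c ∈ xs)
def lastIdxNat (xs : List String) (c : String) : Nat :=
  match xs with
  | [] => 0
  | x :: t => if c ∈ t then lastIdxNat t c + 1 else 0

theorem lastIdxNat_lt_length {xs : List String} {c : String} (h : c ∈ xs) :
    lastIdxNat xs c < xs.length := by
  induction xs with
  | nil => cases h
  | cons x t ih =>
    by_cases ht : c ∈ t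
    · simp [lastIdxNat, ht, ih ht]
    · simp [lastIdxNat, ht]

theorem getElem_lastIdxNat {xs : List String} {c : String} (h : c ∈ xs)
    (hlt : lastIdxNat xs c < xs.length) : xs[lastIdxNat xs c] = c := by
  induction xs with
  | nil => cases h
  | cons x t ih =>
    by_cases ht : c ∈ t
    · have := lastIdxNat_lt_length ht
      simpa [lastIdxNat, ht] using ih ht this
    · have hcx : c = x := by
        rcases List.mem_cons.mp h with h' | h'
        · exact h'
        · exact absurd h' ht
      subst hcx
      simp [lastIdxNat, ht]

theorem le_lastIdxNat {xs : List String} {c : String} {j : Nat}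
    (hj : j < xs.length) (he : xs[j] = c) : j ≤ lastIdxNat xs c := by
  induction xs generalizing j with
  | nil => simp at hj
  | cons x t ih =>
    cases j with
    | zero => exact Nat.zero_le _
    | succ j' =>
      have hj' : j' < t.length := by simpa using hj
      have he' : t[j'] = c := by simpa using he
      have ht : c ∈ t := he' ▸ List.getElem_mem hj'
      have := ih hj' he'
      simp [lastIdxNat, ht]; omega

-- the last-occurrence dict built by B computes lastIdxNat
theorem getD_last_enum (xs : List String) (s : Nat) (d : PySem.Dict String Int)
    (c : String) (v : Int) :
    ((PySem.List.enumerate xs (s : Int)).foldl (fun d p => d.insert p.2 p.1) d).getD c v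
      = if c ∈ xs then (((s + lastIdxNat xs c : Nat) : Int)) else d.getD c v := by
  induction xs generalizing s d with
  | nil => simp [PySem.List.enumerate_nil]
  | cons x t ih =>
    rw [PySem.List.enumerate_cons]
    have hcast : (s : Int) + 1 = ((s + 1 : Nat) : Int) := by push_cast; ring
    rw [List.foldl_cons, hcast, ih]
    by_cases ht : c ∈ t
    · simp [ht, lastIdxNat]; omega
    · by_cases hx : c = x
      · subst hx
        simp [ht, lastIdxNat, PySem.Dict.getD_insert_self]
      · rw [PySem.Dict.getD_insert_of_ne d _ _ hx]
        simp [ht, lastIdxNat, hx]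

-- membership in the window slice xs[s:k+1]
theorem mem_window_iff (xs : List String) (s k : Nat) (c : String) (hk : k < xs.length) :
    (c ∈ (xs.drop s).take (k + 1 - s)) ↔ ∃ j, ∃ _ : j < xs.length, s ≤ j ∧ j ≤ k ∧ xs[j] = c := by
  rw [List.mem_iff_getElem]
  constructor
  · rintro ⟨i, hi, hei⟩
    have hi2 : i < (xs.drop s).length := lt_of_lt_of_le hi (by simp)
    have hi1 : i < k + 1 - s := by simp at hi; omega
    have hi3 : s + i < xs.length := by simp at hi2; omega
    refine ⟨s + i, hi3, by omega, by omega, ?_⟩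
    rw [List.getElem_take, List.getElem_drop] at hei
    exact hei
  · rintro ⟨j, hj, hsj, hjk, he⟩
    have h1 : j - s < ((xs.drop s).take (k + 1 - s)).length := by simp; omega
    refine ⟨j - s, h1, ?_⟩
    rw [List.getElem_take, List.getElem_drop]
    have : s + (j - s) = j := by omega
    simp [this, he]

-- membership in the suffix xs[k+1:]
theorem mem_suffix_iff (xs : List String) (k : Nat) (c : String) :
    (c ∈ xs.drop (k + 1)) ↔ ∃ j, ∃ _ : j < xs.length, k + 1 ≤ j ∧ xs[j] = c := by
  constructor
  · intro hc
    rcases List.mem_iff_getElem.mp hc with ⟨i, hi, hei⟩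
    have hi' : k + 1 + i < xs.length := by simp at hi; omega
    refine ⟨k + 1 + i, hi', by omega, ?_⟩
    rw [List.getElem_drop] at hei; exact hei
  · rintro ⟨j, hj, hkj, he⟩
    have hj' : j - (k + 1) < (xs.drop (k + 1)).length := by simp; omega
    have : (xs.drop (k + 1))[j - (k + 1)] = c := by
      rw [List.getElem_drop]
      have : k + 1 + (j - (k + 1)) = j := by omega
      simp [this, he]
    exact this ▸ List.getElem_mem hj'

-- c (in xs) occurs after position k iff its last occurrence is after k
theorem lastIdx_le_iff_not_mem_suffix (xs : List String) (k : Nat) (c : String) (hc : c ∈ xs) :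
    lastIdxNat xs c ≤ k ↔ c ∉ xs.drop (k + 1) := by
  rw [mem_suffix_iff]
  constructor
  · intro h hcon
    rcases hcon with ⟨j, hj, hkj, he⟩
    have := le_lastIdxNat hj he
    omega
  · intro h
    by_contra hgt
    push_neg at hgt
    have hlt := lastIdxNat_lt_length hc
    exact h ⟨lastIdxNat xs c, hlt, by omega, getElem_lastIdxNat hc hlt⟩

-- A's cut test: the intersection set is empty iff no window element occurs in the suffix
theorem hasRepeating_empty_iff (seq1 seq2 : List String) :
    (hasRepeatingScene seq1 seq2).isEmpty = true ↔ ∀ c ∈ seq1, c ∉ seq2 := by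
  rw [List.isEmpty_iff, List.eq_nil_iff_forall_not_mem]
  unfold hasRepeatingScene
  constructor
  · intro h c hc1 hc2
    exact h c ((PySem.Set.mem_inter _ _ _).mpr ⟨(PySem.Set.mem_ofList _ _).mpr hc1, hc2⟩)
  · intro h c hc
    rcases (PySem.Set.mem_inter _ _ _).mp hc with ⟨h1, h2⟩
    exact h c ((PySem.Set.mem_ofList _ _).mp h1) h2

-- the two step functions, named for the induction
def stepA (xs : List String) (st : Int × List Int) (p : Int × String) : Int × List Int :=
  let seq1 := PySem.List.slice xs (some st.1) (some (p.1 + 1))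
  let seq2 := PySem.List.slice xs (some (p.1 + 1)) none
  if (hasRepeatingScene seq1 seq2).isEmpty then
    (p.1 + 1, st.2 ++ [p.1 - st.1 + 1])
  else st

def stepB (xs : List String) (last : PySem.Dict String Int)
    (st : Int × Int × List Int) (p : Int × String) : Int × Int × List Int :=
  let e := last.getD p.2 0
  let segEnd := if e > st.2.1 then e else st.2.1
  if segEnd == p.1 then
    (p.1 + 1, segEnd, st.2.2 ++ [p.1 - st.1 + 1])
  else (st.1, segEnd, st.2.2)

-- main induction over the unprocessed suffix, with the joint invariant on B's segEnd
theorem main_lemma (xs : List String) (ys : List String) (k s : Nat) (acc : List Int)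
    (segB : Int)
    (hdrop : xs.drop k = ys) (hsk : s ≤ k)
    (hdom : ∀ j, ∀ _ : j < xs.length, s ≤ j → j < k → ((lastIdxNat xs xs[j] : Int)) ≤ segB)
    (hach : segB ≤ (k : Int) ∨ ∃ j, ∃ _ : j < xs.length, s ≤ j ∧ j < k ∧ segB = (lastIdxNat xs xs[j] : Int)) :
    ((PySem.List.enumerate ys (k : Int)).foldl (stepA xs) ((s : Int), acc)).2
      = ((PySem.List.enumerate ys (k : Int)).foldl
          (stepB xs ((PySem.List.enumerate xs (0 : Int)).foldl (fun d p => d.insert p.2 p.1) PySem.Dict.empty))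
          ((s : Int), segB, acc)).2.2 := by
  induction ys generalizing k s acc segB with
  | nil => simp [PySem.List.enumerate_nil]
  | cons y t ih =>
    set lastD : PySem.Dict String Int :=
      (PySem.List.enumerate xs (0 : Int)).foldl (fun d p => d.insert p.2 p.1) PySem.Dict.empty with hlastD
    have hk : k < xs.length := by
      by_contra h
      push_neg at h
      rw [List.drop_eq_nil_of_le h] at hdrop
      exact List.cons_ne_nil y t hdrop.symm
    have hxk : xs[k] = y := by
      have h0 : (xs.drop k)[0]'(by rw [hdrop]; simp) = y := by simp [hdrop]
      rw [List.getElem_drop] at h0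
      simpa using h0
    have hdropk1 : xs.drop (k + 1) = t := by
      have h1 : (xs.drop k).drop 1 = xs.drop (k + 1) := by
        rw [List.drop_drop]
      rw [← h1, hdrop]
      rfl
    have hymem : y ∈ xs := hxk ▸ List.getElem_mem hk
    set L : Int := ((lastIdxNat xs y : Nat) : Int) with hL
    have hlookup : lastD.getD y 0 = L := by
      rw [hlastD]
      have := getD_last_enum xs 0 PySem.Dict.empty y 0
      simpa [hymem, hL] using this
    have hky : (k : Int) ≤ L := by
      have := le_lastIdxNat hk hxk
      rw [hL]
      exact_mod_cast this
    have hmaxif : (if lastD.getD y 0 > segB then lastD.getD y 0 else segB) = max segB L := by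
      rw [hlookup, max_def]
      by_cases h : segB < L
      · simp [h]; omega
      · simp [h]; omega
    have hc1 : ((k : Int) + 1) = ((k + 1 : Nat) : Int) := by push_cast; ring
    -- condition equivalence: A's emptiness test ↔ the running maximum equals k
    have hcond : ((hasRepeatingScene
          (PySem.List.slice xs (some ((s : Nat) : Int)) (some ((k : Int) + 1)))
          (PySem.List.slice xs (some ((k : Int) + 1)) none)).isEmpty = true)
        ↔ (max segB L = (k : Int)) := by
      rw [hc1, PySem.List.slice_natCast, PySem.List.slice_from_natCast, hasRepeating_empty_iff]
      constructor
      · intro h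
        have hy_not : y ∉ xs.drop (k + 1) := by
          apply h
          rw [mem_window_iff xs s k y hk]
          exact ⟨k, hk, hsk, le_refl _, hxk⟩
        have hLle : L ≤ (k : Int) := by
          have := (lastIdx_le_iff_not_mem_suffix xs k y hymem).mpr hy_not
          rw [hL]
          exact_mod_cast this
        have hsb : segB ≤ (k : Int) := by
          rcases hach with hle | ⟨j, hj, hsj, hjk, hse⟩
          · exact hle
          · have hjw : xs[j] ∈ (xs.drop s).take (k + 1 - s) := by
              rw [mem_window_iff xs s k _ hk]
              exact ⟨j, hj, hsj, by omega, rfl⟩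
            have hnot := h _ hjw
            have hjmem : xs[j] ∈ xs := List.getElem_mem hj
            have := (lastIdx_le_iff_not_mem_suffix xs k _ hjmem).mpr hnot
            rw [hse]
            exact_mod_cast this
        have := max_le hsb hLle
        omega
      · intro hmax c hcw
        rcases (mem_window_iff xs s k c hk).mp hcw with ⟨j, hj, hsj, hjk, he⟩
        have hcl : (lastIdxNat xs c : Int) ≤ (k : Int) := by
          by_cases hjlt : j < k
          · have h1 := hdom j hj hsj hjlt
            rw [← he]
            calc ((lastIdxNat xs xs[j] : Nat) : Int) ≤ segB := h1
              _ ≤ max segB L := le_max_left _ _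
              _ = (k : Int) := hmax
          · have hjek : j = k := by omega
            subst hjek
            rw [← he, hxk, ← hL, ← hmax]
            exact le_max_right _ _
        have hcmem : c ∈ xs := he ▸ List.getElem_mem hj
        have hcl' : lastIdxNat xs c ≤ k := by exact_mod_cast hcl
        exact (lastIdx_le_iff_not_mem_suffix xs k c hcmem).mp hcl'
    rw [PySem.List.enumerate_cons, List.foldl_cons, List.foldl_cons]
    have hsB_core : stepB xs lastD ((s : Int), segB, acc) ((k : Int), y)
        = (if max segB L == (k : Int) then
             ((k : Int) + 1, max segB L, acc ++ [(k : Int) - (s : Int) + 1])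
           else ((s : Int), max segB L, acc)) := by
      simp only [stepB]
      rw [hmaxif]
    have hsA_core : stepA xs ((s : Int), acc) ((k : Int), y)
        = (if (hasRepeatingScene
                (PySem.List.slice xs (some ((s : Nat) : Int)) (some ((k : Int) + 1)))
                (PySem.List.slice xs (some ((k : Int) + 1)) none)).isEmpty then
             ((k : Int) + 1, acc ++ [(k : Int) - (s : Int) + 1])
           else ((s : Int), acc)) := by
      simp only [stepA]
    rw [hsA_core, hsB_core]
    by_cases hcut : max segB L = (k : Int)
    · have hA : (hasRepeatingScene
          (PySem.List.slice xs (some ((s : Nat) : Int)) (some ((k : Int) + 1)))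
          (PySem.List.slice xs (some ((k : Int) + 1)) none)).isEmpty = true := hcond.mpr hcut
      rw [hA, hcut]
      simp only [beq_self_eq_true, eq_self_iff_true, if_true]
      rw [hc1]
      exact ih (k + 1) (k + 1) (acc ++ [(k : Int) - (s : Int) + 1]) ((k : Nat) : Int)
        hdropk1 (le_refl _) (fun j hj hsj hjk => by omega) (Or.inl (by push_cast; omega))
    · have hA : (hasRepeatingScene
          (PySem.List.slice xs (some ((s : Nat) : Int)) (some ((k : Int) + 1)))
          (PySem.List.slice xs (some ((k : Int) + 1)) none)).isEmpty = false := by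
        cases hb : (hasRepeatingScene
          (PySem.List.slice xs (some ((s : Nat) : Int)) (some ((k : Int) + 1)))
          (PySem.List.slice xs (some ((k : Int) + 1)) none)).isEmpty with
        | false => rfl
        | true => exact absurd (hcond.mp hb) hcut
      have hBne : (max segB L == (k : Int)) = false := by
        simp only [beq_eq_false_iff_ne, ne_eq]
        exact hcut
      rw [hA, hBne]
      simp only [Bool.false_eq_true, if_false]

      rw [hc1]
      have hdom' : ∀ j, ∀ _ : j < xs.length, s ≤ j → j < k + 1 → ((lastIdxNat xs xs[j] : Int)) ≤ max segB L := by
        intro j hj hsj hjk1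
        by_cases hjlt : j < k
        · exact le_trans (hdom j hj hsj hjlt) (le_max_left _ _)
        · have hje : j = k := by omega
          subst hje
          rw [hxk, ← hL]
          exact le_max_right _ _
      have hach' : max segB L ≤ ((k + 1 : Nat) : Int) ∨
          ∃ j, ∃ _ : j < xs.length, s ≤ j ∧ j < k + 1 ∧ max segB L = (lastIdxNat xs xs[j] : Int) := by
        rcases le_total segB L with hle | hle
        · right
          refine ⟨k, hk, hsk, by omega, ?_⟩
          rw [hxk, max_eq_right hle, hL]
        · rcases hach with hle2 | ⟨j, hj, hsj, hjk, hse⟩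
          · left
            rw [max_eq_left hle]
            push_cast
            omega
          · right
            exact ⟨j, hj, hsj, by omega, by rw [max_eq_left hle, hse]⟩
      exact ih (k + 1) s acc (max segB L) hdropk1 (by omega) hdom' hach'

-- ===== VERDICT (by name: the statement is the Claim_ definition above) =====
theorem lengthEachScene_spec : Claim_equal_lengthEachScene := by
  intro xs _
  unfold Spec_lengthEachScene lengthEachScene lengthEachScene_alt
  have h := main_lemma xs xs 0 0 [] 0 (by simp) (le_refl _)
    (fun j hj hsj hjk => by omega) (Or.inl (by norm_num))
  exact h
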